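-- pv_equiv track=rewrite | github.com/hparik11/interview_questions | snap_phone_screen_regex_match.py | helper
-- ===== SOURCE A (Python) =====
-- def helper(w, rex):
--     stack = []
--     num = 0
--     carry = 0
--     start = 0
--     for i in range(len(rex)):
--         if rex[i].isalpha():
--             stack.append(rex[i])
--             start += 1
--         elif rex[i].isdigit():
--             carry += 1
--             num = num * 10 + int(rex[i])
--         elif rex[i] == "*":
--             try:
--                 stack.append(w[start:start + num])
--                 start = start + num
--                 num = 0
--                 carry = 0
--             except:
--                 return False
--
--     return True if "".join(stack) == w else False
-- ===== SOURCE B (Python) =====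
-- def helper(w, rex):
--     # Single-cursor matcher: a letter must match the next character of w,
--     # digits accumulate a count, and '*' consumes that many characters of w
--     # (or whatever remains).  Match succeeds iff exactly all of w is consumed.
--     pos = 0
--     num = 0
--     for ch in rex:
--         if ch.isalpha():
--             if pos >= len(w) or w[pos] != ch:
--                 return False
--             pos += 1
--         elif ch.isdigit():
--             num = num * 10 + int(ch)
--         elif ch == "*":
--             pos = min(pos + num, len(w))
--             num = 0
--     return pos == len(w)
-- ===== Notes on version B (the rewrite author's own statement) =====
-- stated objective: faster
-- what changed: A builds a stack of letters and copied slices of w and joins them for one final string comparison; B keeps a single cursor into w, matching each letter in place and letting '*' consume min(num, remaining) characters by cursor arithmetic alone, succeeding iff exactly all of w is consumed.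
import Mathlib
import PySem

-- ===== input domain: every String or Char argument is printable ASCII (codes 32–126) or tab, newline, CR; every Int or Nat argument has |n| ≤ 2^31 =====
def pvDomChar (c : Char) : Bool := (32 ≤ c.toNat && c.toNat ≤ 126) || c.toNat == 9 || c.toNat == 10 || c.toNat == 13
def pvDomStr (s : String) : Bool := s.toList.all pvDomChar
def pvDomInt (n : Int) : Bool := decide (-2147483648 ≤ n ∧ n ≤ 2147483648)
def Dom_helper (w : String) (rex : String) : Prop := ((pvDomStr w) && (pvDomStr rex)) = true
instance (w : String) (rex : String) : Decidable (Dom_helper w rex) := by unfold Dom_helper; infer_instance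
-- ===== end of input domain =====

-- B replaces A's stack-build-then-join with a single-cursor incremental match (simpler decomposition).

-- ===== PORT A =====
-- state = (stack, num, carry, start); `int(rex[i])` is ported as c.toNat - 48, exact on the digit
-- chars the isdigit branch admits; A's try/except never fires (string slicing cannot raise), so it has no port.
def helperStep (wl : List Char) (st : List (List Char) × Nat × Nat × Nat) (c : Char) :
    List (List Char) × Nat × Nat × Nat :=
  let (stack, num, carry, start) := st
  if PySem.Chars.isalpha c then (stack ++ [[c]], num, carry, start + 1)
  else if PySem.Chars.isdigit c then (stack, num * 10 + (c.toNat - 48), carry + 1, start)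
  else if c == '*' then
    (stack ++ [PySem.List.slice wl (some (start : Int)) (some ((start : Int) + (num : Int)))],
     0, 0, start + num)
  else st

def helper (w : String) (rex : String) : Bool :=
  let wl := w.toList
  let fin := rex.toList.foldl (helperStep wl) ([], 0, 0, 0)
  PySem.Chars.join [] fin.1 == wl

-- ===== PORT B =====
def helperAltGo (wl : List Char) (cs : List Char) (pos num : Nat) : Bool :=
  match cs with
  | [] => pos == wl.length
  | c :: rest =>
    if PySem.Chars.isalpha c then
      if pos < wl.length && (wl[pos]? == some c) then
        helperAltGo wl rest (pos + 1) num
      else false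
    else if PySem.Chars.isdigit c then
      helperAltGo wl rest pos (num * 10 + (c.toNat - 48))
    else if c == '*' then
      helperAltGo wl rest (min (pos + num) wl.length) 0
    else helperAltGo wl rest pos num

def helper_alt (w : String) (rex : String) : Bool :=
  helperAltGo w.toList rex.toList 0 0

-- ===== PRECONDITION & SPEC =====
def Spec_helper (w : String) (rex : String) (out : Bool) : Prop := out = helper_alt w rex
instance (w : String) (rex : String) (out : Bool) : Decidable (Spec_helper w rex out) := by unfold Spec_helper; infer_instance

-- ===== CLAIM (what is proved, stated in full; the proofs are below) =====
def Claim_equal_helper : Prop := ∀ (w : String) (rex : String), Dom_helper w rex → Spec_helper w rex (helper w rex)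

-- ===== LEMMAS AND PROOFS =====

theorem join_nil_eq_flatten (ps : List (List Char)) : PySem.Chars.join [] ps = ps.flatten := by
  simp only [PySem.Chars.join, List.intercalate]
  induction ps with
  | nil => rfl
  | cons h t ih =>
    cases t with
    | nil => rfl
    | cons h2 t2 => simp_all [List.intersperse]

theorem slice_nat (xs : List Char) (s k : Nat) :
    PySem.List.slice xs (some (s : Int)) (some ((s : Int) + (k : Int))) = (xs.drop s).take k := by
  simp only [PySem.List.slice, PySem.List.clampIdx]
  have h1 : ¬ ((s : Int) < 0) := by omega
  have h2 : ¬ ((s : Int) + (k : Int) < 0) := by omega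
  simp only [if_neg h1, if_neg h2]
  by_cases h : s ≤ xs.length
  · have ha : min ((s : Int)).toNat xs.length = s := by omega
    have hb : min (((s : Int) + (k : Int))).toNat xs.length = min (s + k) xs.length := by omega
    rw [ha, hb]
    apply List.take_eq_take_iff.mpr
    simp only [List.length_drop]
    omega
  · have ha : min ((s : Int)).toNat xs.length = xs.length := by omega
    have hb : min (((s : Int) + (k : Int))).toNat xs.length = xs.length := by omega
    rw [ha, hb]
    rw [List.drop_of_length_le (by omega)]
    simp
    omega

theorem foldA_mono (wl : List Char) (cs : List Char) :
    ∀ st : List (List Char) × Nat × Nat × Nat,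
      st.1.flatten <+: (cs.foldl (helperStep wl) st).1.flatten := by
  induction cs with
  | nil => intro st; simp
  | cons c rest ih =>
    intro st
    refine List.IsPrefix.trans ?_ (ih (helperStep wl st c))
    obtain ⟨stack, num, carry, start⟩ := st
    simp only [helperStep]
    split_ifs <;> simp

theorem prefix_snoc_iff (p wl : List Char) (c : Char) (hp : p <+: wl) :
    p ++ [c] <+: wl ↔ wl[p.length]? = some c := by
  constructor
  · rintro ⟨t, ht⟩; subst ht; simp
  · intro h
    obtain ⟨t, ht⟩ := hp
    subst ht
    cases t with
    | nil => simp at h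
    | cons x xs =>
      simp at h
      subst h
      exact ⟨xs, by simp⟩

theorem prefix_append_of_prefix_drop (p s wl : List Char) (hp : p <+: wl)
    (hs : s <+: wl.drop p.length) : p ++ s <+: wl := by
  obtain ⟨t, ht⟩ := hp
  subst ht
  rw [List.drop_left] at hs
  exact (List.prefix_append_right_inj p).mpr hs

theorem foldA_dead (wl : List Char) (cs : List Char)
    (st : List (List Char) × Nat × Nat × Nat) (h : ¬ st.1.flatten <+: wl) :
    ((cs.foldl (helperStep wl) st).1.flatten == wl) = false := by
  apply beq_eq_false_iff_ne.mpr
  intro heq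
  exact h (heq ▸ foldA_mono wl cs st)

theorem main_go (wl : List Char) (cs : List Char) :
    ∀ (stack : List (List Char)) (num carry start : Nat),
      stack.flatten <+: wl →
      stack.flatten.length ≤ start →
      (stack.flatten.length < start → stack.flatten.length = wl.length) →
      helperAltGo wl cs stack.flatten.length num
        = ((cs.foldl (helperStep wl) (stack, num, carry, start)).1.flatten == wl) := by
  induction cs with
  | nil =>
    intro stack num carry start hp _ _
    simp only [helperAltGo, List.foldl_nil]
    by_cases h : stack.flatten = wl
    · simp [h]
    · have hlt : stack.flatten.length ≠ wl.length := fun hl => h (hp.eq_of_length hl)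
      rw [beq_eq_false_iff_ne.mpr hlt, beq_eq_false_iff_ne.mpr h]
  | cons c rest ih =>
    intro stack num carry start hp hle hstar
    have hplen : stack.flatten.length ≤ wl.length := hp.length_le
    simp only [helperAltGo, List.foldl_cons, helperStep]
    by_cases ha : PySem.Chars.isalpha c
    · simp only [if_pos ha]
      by_cases hc : wl[stack.flatten.length]? = some c
      · obtain ⟨hlt, -⟩ := List.getElem?_eq_some_iff.mp hc
        rw [if_pos (show _ = true by
          simp only [decide_eq_true hlt, beq_iff_eq, Bool.true_and]; exact hc)]
        have hp' : (stack ++ [[c]]).flatten <+: wl := by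
          simpa using (prefix_snoc_iff _ wl c hp).mpr hc
        have hse : stack.flatten.length = start := by
          by_contra hne
          exact absurd (hstar (by omega)) (by omega)
        have := ih (stack ++ [[c]]) num carry (start + 1) hp'
          (by simp only [List.flatten_append, List.flatten_cons, List.flatten_nil,
                List.append_nil, List.length_append, List.length_cons, List.length_nil]; omega)
          (by simp only [List.flatten_append, List.flatten_cons, List.flatten_nil,
                List.append_nil, List.length_append, List.length_cons, List.length_nil]; omega)
        simpa using this
      · rw [if_neg (show ¬ _ = true by
          simp only [Bool.and_eq_true, decide_eq_true_eq, beq_iff_eq]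
          rintro ⟨-, h2⟩; exact hc h2)]
        rw [eq_comm]
        apply foldA_dead
        intro hpre
        exact hc ((prefix_snoc_iff _ wl c hp).mp (by simpa using hpre))
    · simp only [if_neg ha]
      by_cases hd : PySem.Chars.isdigit c
      · simp only [if_pos hd]
        exact ih stack _ _ start hp hle hstar
      · simp only [if_neg hd]
        by_cases hs : c = '*'
        · simp only [hs, beq_self_eq_true, if_pos]
          rw [slice_nat]
          set seg := (wl.drop start).take num with hseg
          by_cases hse : stack.flatten.length = start
          · -- cursor and A's start agree: the slice is taken at the match position
            have hsegpre : seg <+: wl.drop stack.flatten.length := by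
              rw [hse]; exact List.take_prefix _ _
            have hp' : (stack ++ [seg]).flatten <+: wl := by
              simpa using prefix_append_of_prefix_drop _ seg wl hp hsegpre
            have hseglen : seg.length = min num (wl.length - start) := by
              simp [hseg]
            have hlen' : (stack ++ [seg]).flatten.length = min (stack.flatten.length + num) wl.length := by
              simp only [List.flatten_append, List.flatten_cons, List.flatten_nil,
                List.append_nil, List.length_append]
              rw [hseglen]; omega
            have := ih (stack ++ [seg]) 0 0 (start + num) hp'
              (by rw [hlen']; omega) (by rw [hlen']; omega)
            rw [hlen'] at this
            simpa using this
          · -- A's start has run past the end (pos = len wl): the slice is empty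
            have hpl : stack.flatten.length = wl.length := hstar (by omega)
            have hsegnil : seg = [] := by
              rw [hseg, List.drop_of_length_le (by omega)]; simp
            have hp' : (stack ++ [seg]).flatten <+: wl := by simpa [hsegnil] using hp
            have hlen' : (stack ++ [seg]).flatten.length = stack.flatten.length := by
              simp only [hsegnil, List.flatten_append, List.flatten_cons, List.flatten_nil,
                List.append_nil]
            have hmin : min (stack.flatten.length + num) wl.length = stack.flatten.length := by
              omega
            have := ih (stack ++ [seg]) 0 0 (start + num) hp'
              (by rw [hlen']; omega) (by rw [hlen']; omega)
            rw [hlen'] at this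
            rw [hmin]
            simpa using this
        · simp only [if_neg (show ¬ (c == '*') = true from fun h => hs (beq_iff_eq.mp h))]
          exact ih stack num carry start hp hle hstar

-- ===== VERDICT (by name: the statement is the Claim_ definition above) =====
theorem helper_spec : Claim_equal_helper := by
  intro w rex _
  unfold Spec_helper helper helper_alt
  simp only [join_nil_eq_flatten]
  exact (main_go w.toList rex.toList [] 0 0 0 List.nil_prefix (by simp) (by simp)).symm
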